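-- pv_equiv track=rewrite | github.com/ElmouhiYassine/Adder | HyTLConvolution/negation.py | bounds_of_uncertain_twos_complement
-- ===== SOURCE A (Python) =====
-- from typing import List, Tuple
--
-- def bounds_of_uncertain_twos_complement(trits_lsb: List[int]) -> Tuple[int, int]:
--     """
--     Compute exact integer bounds (min,max) of an uncertain 2's-complement word.
--
--     Coding (LSB-first):
--       trit = +1  -> bit is definitely 1
--       trit = -1  -> bit is definitely 0
--       trit =  0  -> bit is uncertain in {0,1}
--
--     Numeric value uses standard two's complement weights:
--       bits 0..n-2 have weight +2^i
--       bit  n-1   has weight -2^(n-1)   (the MSB)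
--     """
--     n = len(trits_lsb)
--     mn = 0
--     mx = 0
--     for i, t in enumerate(trits_lsb):
--         w = (1 << i)
--         if i == n - 1:
--             w = -w  # MSB is negative weight
--
--         if t == +1:
--             # definitely contributes weight
--             mn += w
--             mx += w
--         elif t == -1:
--             # definitely contributes 0
--             pass
--         else:
--             # uncertain: contributes either 0 or w
--             # if w>0: range [0, w]
--             # if w<0: range [w, 0]
--             mn += min(0, w)
--             mx += max(0, w)
--
--     # ensure ordered
--     if mn > mx:
--         mn, mx = mx, mn
--     return mn, mx
-- ===== SOURCE B (Python) =====
-- from typing import List, Tuple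
--
-- def bounds_of_uncertain_twos_complement(trits_lsb: List[int]) -> Tuple[int, int]:
--     """Resolve the uncertain trits into two concrete bit words (one minimizing,
--     one maximizing the value) and decode each with a plain two's-complement decoder."""
--     n = len(trits_lsb)
--     min_bits = []
--     max_bits = []
--     for i, t in enumerate(trits_lsb):
--         neg = (i == n - 1)  # MSB has negative weight
--         if t == 1:
--             bmin, bmax = 1, 1
--         elif t == -1:
--             bmin, bmax = 0, 0
--         else:
--             # uncertain bit: pick the value that minimizes / maximizes the word
--             bmin, bmax = (1, 0) if neg else (0, 1)
--         min_bits.append(bmin)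
--         max_bits.append(bmax)
--
--     def decode(bits):
--         total = 0
--         for i, b in enumerate(bits):
--             if b:
--                 total += -(1 << i) if i == n - 1 else (1 << i)
--         return total
--
--     return decode(min_bits), decode(max_bits)
-- ===== Notes on version B (the rewrite author's own statement) =====
-- stated objective: alternative
-- what changed: B resolves the uncertain trits into two concrete bit words and decodes each with a standard two's-complement decoder, instead of accumulating interval endpoints with min/max per position; the never-firing final swap is dropped.
import Mathlib
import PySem

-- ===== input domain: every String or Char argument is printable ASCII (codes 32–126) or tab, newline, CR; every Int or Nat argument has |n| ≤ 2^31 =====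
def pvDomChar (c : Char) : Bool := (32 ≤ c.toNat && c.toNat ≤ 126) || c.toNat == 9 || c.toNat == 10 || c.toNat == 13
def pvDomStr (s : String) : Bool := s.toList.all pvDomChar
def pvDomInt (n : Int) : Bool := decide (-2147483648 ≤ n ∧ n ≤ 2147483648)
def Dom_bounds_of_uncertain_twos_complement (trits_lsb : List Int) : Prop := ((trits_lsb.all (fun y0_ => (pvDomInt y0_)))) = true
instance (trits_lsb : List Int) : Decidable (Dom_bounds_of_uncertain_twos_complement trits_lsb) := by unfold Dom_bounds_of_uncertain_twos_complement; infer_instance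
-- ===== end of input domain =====

-- B resolves the uncertain trits into two concrete bit words and decodes each with a
-- standard two's-complement decoder (alternative decomposition; A accumulates interval
-- endpoints with min/max per position and ends with a swap that never fires).

-- ===== PORT A =====
def bounds_of_uncertain_twos_complement (trits_lsb : List Int) : Int × Int :=
  let n : Int := trits_lsb.length
  let p := (PySem.List.enumerate trits_lsb).foldl (fun (s : Int × Int) it =>
    let w : Int := if it.1 == n - 1 then -(2 ^ it.1.toNat) else 2 ^ it.1.toNat
    if it.2 == 1 then (s.1 + w, s.2 + w)
    else if it.2 == -1 then s
    else (s.1 + min 0 w, s.2 + max 0 w)) (0, 0)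
  if p.1 > p.2 then (p.2, p.1) else p

-- ===== PORT B =====
-- the (bmin, bmax) pair of resolved bits for one indexed trit
def pvBitPair (n : Int) (it : Int × Int) : Int × Int :=
  if it.2 == 1 then (1, 1)
  else if it.2 == -1 then (0, 0)
  else if it.1 == n - 1 then (1, 0) else (0, 1)

-- plain two's-complement decoder of a bit list (LSB first, n = word length)
def pvDecode (n : Int) (bits : List Int) : Int :=
  (PySem.List.enumerate bits).foldl (fun total ib =>
    if ib.2 ≠ 0 then
      total + (if ib.1 == n - 1 then -(2 ^ ib.1.toNat) else 2 ^ ib.1.toNat)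
    else total) 0

def bounds_of_uncertain_twos_complement_alt (trits_lsb : List Int) : Int × Int :=
  let n : Int := trits_lsb.length
  let pairs := (PySem.List.enumerate trits_lsb).map (pvBitPair n)
  (pvDecode n (pairs.map (·.1)), pvDecode n (pairs.map (·.2)))

-- ===== PRECONDITION & SPEC =====
def Spec_bounds_of_uncertain_twos_complement (trits_lsb : List Int) (out : Int × Int) : Prop := out = bounds_of_uncertain_twos_complement_alt trits_lsb
instance (trits_lsb : List Int) (out : Int × Int) : Decidable (Spec_bounds_of_uncertain_twos_complement trits_lsb out) := by unfold Spec_bounds_of_uncertain_twos_complement; infer_instance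

-- ===== CLAIM (what is proved, stated in full; the proofs are below) =====
def Claim_equal_bounds_of_uncertain_twos_complement : Prop := ∀ (trits_lsb : List Int), Dom_bounds_of_uncertain_twos_complement trits_lsb → Spec_bounds_of_uncertain_twos_complement trits_lsb (bounds_of_uncertain_twos_complement trits_lsb)

-- ===== LEMMAS AND PROOFS =====

-- per-position contributions of A's loop
def cmin (n k t : Int) : Int :=
  let w : Int := if k == n - 1 then -(2 ^ k.toNat) else 2 ^ k.toNat
  if t == 1 then w else if t == -1 then 0 else min 0 w

def cmax (n k t : Int) : Int :=
  let w : Int := if k == n - 1 then -(2 ^ k.toNat) else 2 ^ k.toNat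
  if t == 1 then w else if t == -1 then 0 else max 0 w

-- total contributions of a suffix of trits starting at index k
def Fmin (n : Int) : List Int → Int → Int
  | [], _ => 0
  | t :: l, k => cmin n k t + Fmin n l (k + 1)

def Fmax (n : Int) : List Int → Int → Int
  | [], _ => 0
  | t :: l, k => cmax n k t + Fmax n l (k + 1)

lemma foldA_eq (n : Int) : ∀ (l : List Int) (k a b : Int),
    (PySem.List.enumerate l k).foldl (fun (s : Int × Int) it =>
      let w : Int := if it.1 == n - 1 then -(2 ^ it.1.toNat) else 2 ^ it.1.toNat
      if it.2 == 1 then (s.1 + w, s.2 + w)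
      else if it.2 == -1 then s
      else (s.1 + min 0 w, s.2 + max 0 w)) (a, b)
    = (a + Fmin n l k, b + Fmax n l k) := by
  intro l
  induction l with
  | nil => intro k a b; simp [PySem.List.enumerate_nil, Fmin, Fmax]
  | cons t l ih =>
    intro k a b
    rw [PySem.List.enumerate_cons, List.foldl_cons]
    simp only [Fmin, Fmax, cmin, cmax]
    by_cases h1 : t == 1
    · simp only [h1, if_true, ite_true]
      rw [ih]; apply Prod.ext <;> simp <;> ring
    · by_cases h2 : t == -1
      · simp only [h1, h2, ite_true, Bool.false_eq_true, if_false]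
        rw [ih]; apply Prod.ext <;> simp
      · simp only [h1, h2, Bool.false_eq_true, if_false]
        rw [ih]; apply Prod.ext <;> simp <;> ring

lemma decode_fold_min (n : Int) : ∀ (l : List Int) (k total : Int),
    (PySem.List.enumerate ((PySem.List.enumerate l k).map (fun it => (pvBitPair n it).1)) k).foldl
      (fun total ib =>
        if ib.2 ≠ 0 then
          total + (if ib.1 == n - 1 then -(2 ^ ib.1.toNat) else 2 ^ ib.1.toNat)
        else total) total
    = total + Fmin n l k := by
  intro l
  induction l with
  | nil => intro k total; simp [PySem.List.enumerate_nil, Fmin]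
  | cons t l ih =>
    intro k total
    rw [PySem.List.enumerate_cons, List.map_cons, PySem.List.enumerate_cons, List.foldl_cons]
    rw [ih, Fmin]
    unfold pvBitPair cmin
    by_cases h1 : t == 1
    · simp only [h1, ite_true]; simp; ring
    · by_cases h2 : t == -1
      · simp [h1, h2]
      · simp only [h1, h2, Bool.false_eq_true, if_false]
        by_cases h3 : k = n - 1
        · have : (k == n - 1) = true := by simpa using h3
          simp only [this, ite_true]
          have hp : (0:Int) ≤ 2 ^ k.toNat := by positivity
          have : min (0:Int) (-(2 ^ k.toNat)) = -(2 ^ k.toNat) := by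
            apply min_eq_right; omega
          simp [this]; ring
        · have hk : (k == n - 1) = false := by simpa using h3
          have hp : (0:Int) ≤ 2 ^ k.toNat := by positivity
          simp only [hk]
          have : min (0:Int) (2 ^ k.toNat) = 0 := min_eq_left hp
          simp [this]

lemma decode_fold_max (n : Int) : ∀ (l : List Int) (k total : Int),
    (PySem.List.enumerate ((PySem.List.enumerate l k).map (fun it => (pvBitPair n it).2)) k).foldl
      (fun total ib =>
        if ib.2 ≠ 0 then
          total + (if ib.1 == n - 1 then -(2 ^ ib.1.toNat) else 2 ^ ib.1.toNat)
        else total) total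
    = total + Fmax n l k := by
  intro l
  induction l with
  | nil => intro k total; simp [PySem.List.enumerate_nil, Fmax]
  | cons t l ih =>
    intro k total
    rw [PySem.List.enumerate_cons, List.map_cons, PySem.List.enumerate_cons, List.foldl_cons]
    rw [ih, Fmax]
    unfold pvBitPair cmax
    by_cases h1 : t == 1
    · simp only [h1, ite_true]; simp; ring
    · by_cases h2 : t == -1
      · simp [h1, h2]
      · simp only [h1, h2, Bool.false_eq_true, if_false]
        by_cases h3 : k = n - 1
        · have : (k == n - 1) = true := by simpa using h3
          simp only [this, ite_true]
          have hp : (0:Int) ≤ 2 ^ k.toNat := by positivity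
          have : max (0:Int) (-(2 ^ k.toNat)) = 0 := by
            apply max_eq_left; omega
          simp [this]
        · have hk : (k == n - 1) = false := by simpa using h3
          have hp : (0:Int) ≤ 2 ^ k.toNat := by positivity
          simp only [hk]
          have : max (0:Int) (2 ^ k.toNat) = 2 ^ k.toNat := max_eq_right hp
          simp [this]; ring

lemma Fmin_le_Fmax (n : Int) : ∀ (l : List Int) (k : Int), Fmin n l k ≤ Fmax n l k := by
  intro l
  induction l with
  | nil => intro k; simp [Fmin, Fmax]
  | cons t l ih =>
    intro k
    have hc : cmin n k t ≤ cmax n k t := by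
      unfold cmin cmax
      by_cases h1 : t == 1
      · simp [h1]
      · by_cases h2 : t == -1
        · simp [h1, h2]
        · simp only [h1, h2, Bool.false_eq_true, if_false]
          exact le_trans (min_le_left _ _) (le_max_left _ _)
    simpa [Fmin, Fmax] using add_le_add hc (ih (k + 1))

-- ===== VERDICT (by name: the statement is the Claim_ definition above) =====
theorem bounds_of_uncertain_twos_complement_spec : Claim_equal_bounds_of_uncertain_twos_complement := by
  intro l _
  unfold Spec_bounds_of_uncertain_twos_complement
  unfold bounds_of_uncertain_twos_complement bounds_of_uncertain_twos_complement_alt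
  simp only [List.map_map, Function.comp_def]
  rw [foldA_eq ((l.length : Int)) l 0 0 0]
  unfold pvDecode
  rw [decode_fold_min ((l.length : Int)) l 0 0, decode_fold_max ((l.length : Int)) l 0 0]
  have h := Fmin_le_Fmax ((l.length : Int)) l 0
  simp [not_lt.mpr h, h]
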